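-- pv_equiv track=rewrite | github.com/pushpa-info-14/python-programming | LeetCode/3500-3750/Q3741 Minimum Distance Between Three Equal Elements II.py | minimumDistance2
-- ===== SOURCE A (Python) =====
-- from collections import defaultdict
-- from typing import List
--
-- def minimumDistance2(nums: List[int]) -> int:
--     inf = 10 ** 10
--     res = inf
--     mp = defaultdict(list)
--     for index, num in enumerate(nums):
--         mp[num].append(index)
--     for indexes in mp.values():
--         if len(indexes) > 2:
--             for i in range(len(indexes) - 2):
--                 res = min(res, 2 * (indexes[i + 2] - indexes[i]))
--     return res if res != inf else -1
-- ===== SOURCE B (Python) =====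
-- def minimumDistance2(nums):
--     INF = 10 ** 10
--     res = INF
--     last = {}  # value -> its last one or two indices seen so far
--     for cur, v in enumerate(nums):
--         if v in last:
--             p = last[v]
--             if len(p) == 2:
--                 res = min(res, 2 * (cur - p[0]))
--                 last[v] = [p[1], cur]
--             else:
--                 last[v] = [p[0], cur]
--         else:
--             last[v] = [cur]
--     return res if res != INF else -1
-- ===== Notes on version B (the rewrite author's own statement) =====
-- stated objective: alternative
-- what changed: Replaces A's two-phase approach (build full per-value index lists, then a second nested loop over each list's windows) by a single online pass that keeps only the last one or two indices per value and updates the running minimum as each index arrives.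
import Mathlib
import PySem

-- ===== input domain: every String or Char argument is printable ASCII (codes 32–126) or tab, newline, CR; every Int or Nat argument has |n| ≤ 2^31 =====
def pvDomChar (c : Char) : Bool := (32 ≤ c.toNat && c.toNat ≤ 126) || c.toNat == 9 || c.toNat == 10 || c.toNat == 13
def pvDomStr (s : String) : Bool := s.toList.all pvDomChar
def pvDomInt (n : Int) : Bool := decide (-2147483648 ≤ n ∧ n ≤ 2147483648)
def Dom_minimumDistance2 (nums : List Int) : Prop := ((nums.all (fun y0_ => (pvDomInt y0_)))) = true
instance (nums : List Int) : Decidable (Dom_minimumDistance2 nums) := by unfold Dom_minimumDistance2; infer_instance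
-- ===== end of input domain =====

-- B replaces A's two-phase scheme (full per-value index lists, then a nested window loop)
-- by one online pass keeping only the last two indices per value (objective: alternative).

-- ===== PORT A =====
def minimumDistance2 (nums : List Int) : Int :=
  let inf : Int := 10 ^ 10
  let mp : PySem.Dict Int (List Int) :=
    (PySem.List.enumerate nums).foldl
      (fun d p => d.modify p.2 [] (fun l => l ++ [p.1])) PySem.Dict.empty
  let res : Int :=
    mp.values.foldl
      (fun res indexes =>
        if 2 < (indexes.length : Int) then
          (PySem.List.pyRange 0 ((indexes.length : Int) - 2) 1).foldl
            (fun res i =>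
              -- indexes[i + 2] / indexes[i]: i is always in range here, so pyGetD is exact
              min res (2 * (PySem.List.pyGetD indexes (i + 2) 0 - PySem.List.pyGetD indexes i 0)))
            res
        else res)
      inf
  if res ≠ inf then res else -1

-- ===== PORT B =====
def minimumDistance2_alt (nums : List Int) : Int :=
  let inf : Int := 10 ^ 10
  let st : Int × PySem.Dict Int (List Int) :=
    (PySem.List.enumerate nums).foldl
      (fun st p =>
        match st.2.get? p.2 with
        | some l =>
          if l.length == 2 then
            -- l[0] / l[1]: l has exactly the stored last two indices, so pyGetD is exact
            (min st.1 (2 * (p.1 - PySem.List.pyGetD l 0 0)),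
             st.2.insert p.2 [PySem.List.pyGetD l 1 0, p.1])
          else
            (st.1, st.2.insert p.2 [PySem.List.pyGetD l 0 0, p.1])
        | none => (st.1, st.2.insert p.2 [p.1]))
      (inf, PySem.Dict.empty)
  if st.1 ≠ inf then st.1 else -1

-- ===== PRECONDITION & SPEC =====
def Spec_minimumDistance2 (nums : List Int) (out : Int) : Prop := out = minimumDistance2_alt nums
instance (nums : List Int) (out : Int) : Decidable (Spec_minimumDistance2 nums out) := by unfold Spec_minimumDistance2; infer_instance

-- ===== CLAIM (what is proved, stated in full; the proofs are below) =====
def Claim_equal_minimumDistance2 : Prop := ∀ (nums : List Int), Dom_minimumDistance2 nums → Spec_minimumDistance2 nums (minimumDistance2 nums)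

-- ===== LEMMAS AND PROOFS =====

-- per-value window costs: for consecutive occurrence indices a < b < c, the cost 2*(c - a)
def pvWins : List Int → List Int
  | a :: b :: c :: t => 2 * (c - a) :: pvWins (b :: c :: t)
  | _ => []

-- indices (as Int) at which v occurs in nums
def pvIdxs (v : Int) (nums : List Int) : List Int :=
  ((PySem.List.enumerate nums).filter (fun p => p.2 == v)).map (fun p => p.1)

-- all candidate costs, grouped by value in first-occurrence order (A's traversal order)
def pvCands (nums : List Int) : List Int :=
  (PySem.List.dedup nums).flatMap (fun v => pvWins (pvIdxs v nums))

-- the last one or two occurrence indices of v, as B's dict stores them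
def pvLast (v : Int) (nums : List Int) : Option (List Int) :=
  if pvIdxs v nums = [] then none
  else some ((pvIdxs v nums).drop ((pvIdxs v nums).length - 2))

theorem pvWins_short (idx : List Int) (h : idx.length ≤ 2) : pvWins idx = [] := by
  match idx with
  | [] => rfl
  | [a] => rfl
  | [a, b] => rfl
  | a :: b :: c :: t => simp at h


theorem pyGetD_cons_succ (x : Int) (xs : List Int) (i : Int) (hi : 0 ≤ i) (d : Int) :
    PySem.List.pyGetD (x :: xs) (i + 1) d = PySem.List.pyGetD xs i d := by
  simp only [PySem.List.pyGetD, PySem.List.pyGet?, PySem.List.pyIdx?]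
  rw [if_pos (by omega : (0:Int) ≤ i + 1), if_pos hi]
  by_cases h : i < (xs.length : Int)
  · rw [if_pos (by simpa using by omega : i + 1 < ((x :: xs).length : Int)), if_pos h]
    simp only [Option.bind_some]
    have : (i + 1).toNat = i.toNat + 1 := by omega
    simp [this]
  · rw [if_neg (by simpa using by omega : ¬ i + 1 < ((x :: xs).length : Int)), if_neg h]
    rfl

theorem pyGetD_zero (x : Int) (xs : List Int) (d : Int) :
    PySem.List.pyGetD (x :: xs) 0 d = x := by
  simp [PySem.List.pyGetD, PySem.List.pyGet?, PySem.List.pyIdx?]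

theorem pyGetD_two (x y z : Int) (t : List Int) (d : Int) :
    PySem.List.pyGetD (x :: y :: z :: t) 2 d = z := by
  rw [(by norm_num : (2:Int) = 1 + 1), pyGetD_cons_succ _ _ 1 (by norm_num),
      (by norm_num : (1:Int) = 0 + 1), pyGetD_cons_succ _ _ 0 le_rfl, pyGetD_zero]

theorem inner_eq (idx : List Int) (r : Int) :
    (PySem.List.pyRange 0 ((idx.length : Int) - 2) 1).foldl
      (fun res i =>
        min res (2 * (PySem.List.pyGetD idx (i + 2) 0 - PySem.List.pyGetD idx i 0))) r
      = (pvWins idx).foldl min r := by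
  induction idx using pvWins.induct generalizing r with
  | case2 t h =>
    have hlen : t.length ≤ 2 := by
      match t with
      | [] => simp
      | [a] => simp
      | [a, b] => simp
      | a :: b :: c :: t' => exact absurd rfl (h a b c t' · )
    have : pvWins t = [] := by
      match t, hlen with
      | [], _ => rfl
      | [a], _ => rfl
      | [a, b], _ => rfl
    rw [this, PySem.List.pyRange_one_eq_nil (by push_cast; omega)]
    rfl
  | case1 a b c t ih =>
    have hn : (0:Int) < ((a :: b :: c :: t).length : Int) - 2 := by simp; omega
    rw [PySem.List.pyRange_one_cons hn]
    rw [List.foldl_cons]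
    have h2 : PySem.List.pyGetD (a :: b :: c :: t) (0 + 2) 0 = c := by
      norm_num [pyGetD_two]
    have h0 : PySem.List.pyGetD (a :: b :: c :: t) 0 0 = a := pyGetD_zero _ _ _
    rw [h2, h0]
    have hshift :
        (PySem.List.pyRange (0+1) (((a :: b :: c :: t).length : Int) - 2) 1).foldl
          (fun res i =>
            min res (2 * (PySem.List.pyGetD (a :: b :: c :: t) (i + 2) 0
                          - PySem.List.pyGetD (a :: b :: c :: t) i 0)))
          (min r (2 * (c - a)))
        = (PySem.List.pyRange 0 (((b :: c :: t).length : Int) - 2) 1).foldl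
          (fun res i =>
            min res (2 * (PySem.List.pyGetD (b :: c :: t) (i + 2) 0
                          - PySem.List.pyGetD (b :: c :: t) i 0)))
          (min r (2 * (c - a))) := by
      rw [PySem.List.pyRange_one, PySem.List.pyRange_one]
      have hcnt : ((((a :: b :: c :: t).length : Int) - 2) - (0+1)).toNat
                = ((((b :: c :: t).length : Int) - 2) - 0).toNat := by simp; omega
      rw [hcnt, List.foldl_map, List.foldl_map]
      apply PySem.List.foldl_congr_mem
      intro acc k _
      have e1 : (0:Int) + 1 + (k:Int) + 2 = ((k:Int) + 2) + 1 := by ring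
      have e2 : (0:Int) + 1 + (k:Int) = (k:Int) + 1 := by ring
      have e3 : (0:Int) + (k:Int) = (k:Int) := by ring
      rw [e1, e2, e3, pyGetD_cons_succ _ _ _ (by omega), pyGetD_cons_succ _ _ _ (by omega)]
    rw [hshift, ih]
    rfl

theorem foldl_min_out (l : List Int) (a c : Int) :
    l.foldl min (min a c) = min (l.foldl min a) c := by
  induction l generalizing a with
  | nil => rfl
  | cons x t ih => simp only [List.foldl_cons, min_right_comm a c x, ih]

theorem foldl_min_insert (X Y : List Int) (a c : Int) :
    (X ++ c :: Y).foldl min a = min ((X ++ Y).foldl min a) c := by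
  simp only [List.foldl_append, List.foldl_cons, foldl_min_out]

theorem foldl_flatMap_min {α : Type} (l : List α) (g : α → List Int) (a : Int) :
    (l.flatMap g).foldl min a = l.foldl (fun r v => (g v).foldl min r) a := by
  induction l generalizing a with
  | nil => rfl
  | cons x t ih => simp [List.flatMap_cons, List.foldl_append, ih]

theorem pvIdxs_nil_of_not_mem (v : Int) (p : List Int) (h : v ∉ p) : pvIdxs v p = [] := by
  unfold pvIdxs
  rw [List.filter_eq_nil_iff.mpr, List.map_nil]
  intro q hq
  rcases (PySem.List.mem_enumerate_iff _ _ _).mp hq with ⟨k, hk, rfl⟩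
  simp only [beq_iff_eq]
  intro hv
  exact h (hv ▸ List.getElem_mem hk)

theorem pvIdxs_append_self (x : Int) (p : List Int) :
    pvIdxs x (p ++ [x]) = pvIdxs x p ++ [(p.length : Int)] := by
  unfold pvIdxs
  rw [PySem.List.enumerate_append, List.filter_append, List.map_append]
  simp [PySem.List.enumerate]

theorem pvIdxs_append_ne (v x : Int) (p : List Int) (h : v ≠ x) :
    pvIdxs v (p ++ [x]) = pvIdxs v p := by
  unfold pvIdxs
  rw [PySem.List.enumerate_append, List.filter_append, List.map_append]
  simp [PySem.List.enumerate, h.symm]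

theorem pvWins_append (l : List Int) (c : Int) :
    pvWins (l ++ [c]) =
      pvWins l ++ (if 2 ≤ l.length then [2 * (c - (l.drop (l.length - 2)).headI)] else []) := by
  induction l using pvWins.induct with
  | case2 t h =>
    match t, h with
    | [], _ => rfl
    | [a], _ => rfl
    | [a, b], _ => rfl
    | a :: b :: c' :: t', h => exact absurd rfl (h a b c' t')
  | case1 a b c' t ih =>
    show pvWins (a :: b :: c' :: (t ++ [c])) = _
    rw [pvWins]
    rw [show (b :: c' :: t) ++ [c] = b :: c' :: (t ++ [c]) by simp] at ih
    rw [ih]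
    have h1 : 2 ≤ (b :: c' :: t).length := by simp
    have h2 : 2 ≤ (a :: b :: c' :: t).length := by simp
    rw [if_pos h1, if_pos h2]
    have : (a :: b :: c' :: t).drop ((a :: b :: c' :: t).length - 2)
         = (b :: c' :: t).drop ((b :: c' :: t).length - 2) := by
      simp only [List.length_cons]
      rw [show t.length + 1 + 1 + 1 - 2 = (t.length + 1 + 1 - 2) + 1 by omega]
      rfl
    rw [pvWins, this]
    simp

theorem pvIdxs_ne_nil_of_mem (v : Int) (p : List Int) (h : v ∈ p) : pvIdxs v p ≠ [] := by
  unfold pvIdxs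
  obtain ⟨k, hk, hv⟩ := List.mem_iff_getElem.mp h
  have hmem : ((k : Int), v) ∈ (PySem.List.enumerate p).filter (fun q => q.2 == v) := by
    rw [List.mem_filter]
    refine ⟨(PySem.List.mem_enumerate_iff _ _ _).mpr ⟨k, hk, by simp [hv]⟩, by simp⟩
  simp only [ne_eq, List.map_eq_nil_iff]
  intro hnil
  rw [hnil] at hmem
  exact absurd hmem (List.not_mem_nil)

theorem dedup_append_mem (x : Int) (p : List Int) (h : x ∈ p) :
    PySem.List.dedup (p ++ [x]) = PySem.List.dedup p := by
  simp only [PySem.List.dedup_eq_ofList, PySem.Set.ofList_eq_foldl, List.foldl_append,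
    List.foldl_cons, List.foldl_nil]
  rw [PySem.Set.add, if_pos]
  rw [show PySem.Set.contains (List.foldl PySem.Set.add [] p) x = List.contains (List.foldl PySem.Set.add [] p) x from rfl]
  rw [List.contains_iff_mem]
  rw [← PySem.Set.ofList_eq_foldl]
  exact (PySem.Set.mem_ofList _ _).mpr h

theorem dedup_append_not_mem (x : Int) (p : List Int) (h : x ∉ p) :
    PySem.List.dedup (p ++ [x]) = PySem.List.dedup p ++ [x] := by
  simp only [PySem.List.dedup_eq_ofList, PySem.Set.ofList_eq_foldl, List.foldl_append,
    List.foldl_cons, List.foldl_nil]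
  rw [PySem.Set.add, if_neg]
  simp only [PySem.Set.contains, List.contains_iff_mem, ← PySem.Set.ofList_eq_foldl]
  simpa [PySem.Set.mem_ofList] using h

theorem flatMap_congr_mem {α β : Type} (l : List α) (f g : α → List β)
    (h : ∀ v ∈ l, f v = g v) : l.flatMap f = l.flatMap g := by
  rw [List.flatMap_def, List.flatMap_def, List.map_congr_left h]

theorem pvCands_append_not_mem (x : Int) (p : List Int) (h : x ∉ p) :
    pvCands (p ++ [x]) = pvCands p := by
  unfold pvCands
  rw [dedup_append_not_mem x p h, List.flatMap_append]
  have h1 : (PySem.List.dedup p).flatMap (fun v => pvWins (pvIdxs v (p ++ [x])))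
      = (PySem.List.dedup p).flatMap (fun v => pvWins (pvIdxs v p)) := by
    apply flatMap_congr_mem
    intro v hv
    have hvp : v ∈ p := (PySem.List.mem_dedup _ _).mp hv
    rw [pvIdxs_append_ne v x p (fun hvx => h (hvx ▸ hvp))]
  rw [h1]
  have h2 : [x].flatMap (fun v => pvWins (pvIdxs v (p ++ [x]))) = [] := by
    simp only [List.flatMap_cons, List.flatMap_nil, List.append_nil]
    rw [pvIdxs_append_self, pvIdxs_nil_of_not_mem x p h]
    rfl
  rw [h2, List.append_nil]

theorem pvCands_append_mem (x : Int) (p : List Int) (h : x ∈ p) :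
    ∃ X Y, pvCands p = X ++ Y ∧
      pvCands (p ++ [x]) = X ++ ((if 2 ≤ (pvIdxs x p).length then
        [2 * ((p.length : Int) - ((pvIdxs x p).drop ((pvIdxs x p).length - 2)).headI)] else []) ++ Y) := by
  obtain ⟨L1, L2, hd⟩ := List.append_of_mem ((PySem.List.mem_dedup p x).mpr h)
  have hnd := PySem.List.nodup_dedup (xs := p)
  rw [hd] at hnd
  rw [List.nodup_middle, List.nodup_cons] at hnd
  obtain ⟨hxn, -⟩ := hnd
  have hx1 : x ∉ L1 := fun hx => hxn (List.mem_append.mpr (Or.inl hx))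
  have hx2 : x ∉ L2 := fun hx => hxn (List.mem_append.mpr (Or.inr hx))
  refine ⟨L1.flatMap (fun v => pvWins (pvIdxs v p)) ++ pvWins (pvIdxs x p),
          L2.flatMap (fun v => pvWins (pvIdxs v p)), ?_, ?_⟩
  · unfold pvCands
    rw [hd, List.flatMap_append, List.flatMap_cons, List.append_assoc]
  · unfold pvCands
    rw [dedup_append_mem x p h, hd, List.flatMap_append, List.flatMap_cons]
    have hL1 : L1.flatMap (fun v => pvWins (pvIdxs v (p ++ [x])))
        = L1.flatMap (fun v => pvWins (pvIdxs v p)) :=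
      flatMap_congr_mem _ _ _ (fun v hv => by
        rw [pvIdxs_append_ne v x p (fun hvx => hx1 (hvx ▸ hv))])
    have hL2 : L2.flatMap (fun v => pvWins (pvIdxs v (p ++ [x])))
        = L2.flatMap (fun v => pvWins (pvIdxs v p)) :=
      flatMap_congr_mem _ _ _ (fun v hv => by
        rw [pvIdxs_append_ne v x p (fun hvx => hx2 (hvx ▸ hv))])
    rw [hL1, hL2, pvIdxs_append_self, pvWins_append]
    simp only [List.append_assoc]

-- key structural facts about A's dict
theorem mp_getD (nums : List Int) (v : Int) :
    ((PySem.List.enumerate nums).foldl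
      (fun d p => d.modify p.2 [] (fun l => l ++ [p.1])) PySem.Dict.empty).getD v []
    = pvIdxs v nums := by
  have hswap : ((PySem.List.enumerate nums).map (fun p => ((p.2 : Int), (p.1 : Int)))).foldl
      (fun d p => d.modify p.1 [] (fun l => l ++ [p.2])) (PySem.Dict.empty : PySem.Dict Int (List Int))
      = (PySem.List.enumerate nums).foldl
      (fun d p => d.modify p.2 [] (fun l => l ++ [p.1])) PySem.Dict.empty := by
    rw [List.foldl_map]
  rw [← hswap, PySem.Dict.getD_foldl_modify_append]
  simp [pvIdxs, PySem.Dict.getD_empty, List.filter_map, List.map_map, Function.comp_def]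
theorem mp_keys (nums : List Int) :
    ((PySem.List.enumerate nums).foldl
      (fun d p => d.modify p.2 [] (fun l => l ++ [p.1])) PySem.Dict.empty).keys
    = PySem.List.dedup nums := by
  have h := PySem.Dict.keys_foldl_modify_key (PySem.List.enumerate nums) (fun p => p.2) ([] : List Int)
    (fun _ p => (fun l => l ++ [p.1])) PySem.Dict.empty
  rw [show (List.foldl (fun d p => d.modify p.2 [] fun l => l ++ [p.1]) PySem.Dict.empty (PySem.List.enumerate nums))
      = (List.foldl (fun d x => d.modify ((fun (p : Int × Int) => p.2) x) ([] : List Int) ((fun _ p => (fun l => l ++ [p.1])) d x)) PySem.Dict.empty (PySem.List.enumerate nums)) from rfl, h]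
  rw [show (PySem.Dict.empty : PySem.Dict Int (List Int)).keys = PySem.Set.empty from rfl]
  rw [PySem.Set.update_empty, PySem.List.map_snd_enumerate, PySem.List.dedup_eq_ofList]
theorem mp_nodup (nums : List Int) :
    ((PySem.List.enumerate nums).foldl
      (fun d p => d.modify p.2 [] (fun l => l ++ [p.1])) PySem.Dict.empty).keys.Nodup := by
  exact PySem.Dict.nodup_keys_foldl_modify_key (PySem.List.enumerate nums) (fun p => p.2) ([] : List Int)
    (fun _ p => (fun l => l ++ [p.1])) PySem.Dict.empty (by simp [PySem.Dict.keys_empty])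

theorem A_eq_cands (nums : List Int) :
    minimumDistance2 nums =
      (if (pvCands nums).foldl min (10 ^ 10) ≠ 10 ^ 10 then (pvCands nums).foldl min (10 ^ 10) else -1) := by
  unfold minimumDistance2
  simp only []
  rw [PySem.Dict.values_eq_map_keys _ (mp_nodup nums) []]
  rw [mp_keys]
  rw [List.foldl_map]
  have hstep : ∀ (r : Int) (v : Int), v ∈ PySem.List.dedup nums →
      (fun res k =>
        (fun res indexes =>
          if 2 < (indexes.length : Int) then
            (PySem.List.pyRange 0 ((indexes.length : Int) - 2) 1).foldl
              (fun res i =>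
                min res (2 * (PySem.List.pyGetD indexes (i + 2) 0 - PySem.List.pyGetD indexes i 0)))
              res
          else res) res
          (((PySem.List.enumerate nums).foldl
            (fun d p => d.modify p.2 [] (fun l => l ++ [p.1])) PySem.Dict.empty).getD k [])) r v
      = (fun r v => (pvWins (pvIdxs v nums)).foldl min r) r v := by
    intro r v _
    simp only [mp_getD]
    by_cases h : 2 < ((pvIdxs v nums).length : Int)
    · rw [if_pos h, inner_eq]
    · rw [if_neg h, pvWins_short _ (by omega), List.foldl_nil]
  rw [PySem.List.foldl_congr_mem _ _ _ _ hstep]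
  rw [← foldl_flatMap_min]
  rfl

theorem B_loop (nums : List Int) :
    ((PySem.List.enumerate nums).foldl
      (fun st p =>
        match st.2.get? p.2 with
        | some l =>
          if l.length == 2 then
            (min st.1 (2 * (p.1 - PySem.List.pyGetD l 0 0)),
             st.2.insert p.2 [PySem.List.pyGetD l 1 0, p.1])
          else
            (st.1, st.2.insert p.2 [PySem.List.pyGetD l 0 0, p.1])
        | none => (st.1, st.2.insert p.2 [p.1]))
      ((10 ^ 10 : Int), PySem.Dict.empty)).1 = (pvCands nums).foldl min (10 ^ 10)
    ∧ ∀ v, ((PySem.List.enumerate nums).foldl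
      (fun st p =>
        match st.2.get? p.2 with
        | some l =>
          if l.length == 2 then
            (min st.1 (2 * (p.1 - PySem.List.pyGetD l 0 0)),
             st.2.insert p.2 [PySem.List.pyGetD l 1 0, p.1])
          else
            (st.1, st.2.insert p.2 [PySem.List.pyGetD l 0 0, p.1])
        | none => (st.1, st.2.insert p.2 [p.1]))
      ((10 ^ 10 : Int), PySem.Dict.empty)).2.get? v = pvLast v nums := by
  induction nums using List.reverseRecOn with
  | nil =>
    refine ⟨rfl, fun v => ?_⟩
    simp [pvLast, pvIdxs, PySem.List.enumerate, PySem.Dict.get?_empty]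
  | append_singleton p x ih =>
    obtain ⟨ih1, ih2⟩ := ih
    rw [PySem.List.enumerate_append]
    have hsing : PySem.List.enumerate [x] (0 + (p.length : Int)) = [((p.length : Int), x)] := by
      simp [PySem.List.enumerate]
    rw [hsing, List.foldl_append, List.foldl_cons, List.foldl_nil]
    simp only []
    cases hget : (List.foldl
      (fun st p =>
        match st.2.get? p.2 with
        | some l =>
          if l.length == 2 then
            (min st.1 (2 * (p.1 - PySem.List.pyGetD l 0 0)),
             st.2.insert p.2 [PySem.List.pyGetD l 1 0, p.1])
          else
            (st.1, st.2.insert p.2 [PySem.List.pyGetD l 0 0, p.1])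
        | none => (st.1, st.2.insert p.2 [p.1]))
      ((10 ^ 10 : Int), PySem.Dict.empty) (PySem.List.enumerate p 0)).2.get? x with
    | none =>
      have hplast : pvLast x p = none := (ih2 x).symm.trans hget
      have hnil : pvIdxs x p = [] := by
        by_cases h : pvIdxs x p = []
        · exact h
        · simp [pvLast, h] at hplast
      have hxp : x ∉ p := fun hmem => pvIdxs_ne_nil_of_mem x p hmem hnil
      simp only []
      refine ⟨?_, fun v => ?_⟩
      · simpa [pvCands_append_not_mem x p hxp] using ih1
      · rw [PySem.Dict.get?_insert]
        by_cases hv : v = x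
        · subst hv
          rw [if_pos rfl]
          rw [pvLast, pvIdxs_append_self, hnil]
          simp
        · rw [if_neg hv, ih2 v, pvLast, pvLast, pvIdxs_append_ne v x p hv]
    | some stored =>
      have hplast : pvLast x p = some stored := (ih2 x).symm.trans hget
      have hne : pvIdxs x p ≠ [] := by
        intro h; simp [pvLast, h] at hplast
      have hstored : stored = (pvIdxs x p).drop ((pvIdxs x p).length - 2) := by
        rw [pvLast, if_neg hne] at hplast
        exact (Option.some_injective _ hplast).symm
      have hmem : x ∈ p := by
        by_contra hmem
        exact hne (pvIdxs_nil_of_not_mem x p hmem)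
      obtain ⟨X, Y, hXY, hXE⟩ := pvCands_append_mem x p hmem
      simp only []
      by_cases hlen : 2 ≤ (pvIdxs x p).length
      · have hsl : stored.length = 2 := by
          rw [hstored, List.length_drop]; omega
        obtain ⟨u, w, huw⟩ := List.length_eq_two.mp hsl
        rw [show (stored.length == 2) = true by simp [hsl]]
        simp only [if_true]
        have hg0 : PySem.List.pyGetD stored 0 0 = u := by rw [huw, pyGetD_zero]
        have hg1 : PySem.List.pyGetD stored 1 0 = w := by
          rw [huw, show (1:Int) = 0 + 1 by norm_num, pyGetD_cons_succ _ _ _ le_rfl, pyGetD_zero]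
        refine ⟨?_, fun v => ?_⟩
        · rw [hXE, if_pos hlen, hg0]
          have hu : ((pvIdxs x p).drop ((pvIdxs x p).length - 2)).headI = u := by
            rw [← hstored, huw]; rfl
          rw [hu, show X ++ ([2 * ((p.length : Int) - u)] ++ Y) = X ++ (2 * ((p.length : Int) - u)) :: Y by simp]
          rw [foldl_min_insert, ← hXY, ih1]
        · rw [PySem.Dict.get?_insert]
          by_cases hv : v = x
          · rw [if_pos hv, hv, hg1, pvLast, pvIdxs_append_self]
            rw [if_neg (by simp)]
            have hdrop : ((pvIdxs x p) ++ [(p.length : Int)]).drop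
                (((pvIdxs x p) ++ [(p.length : Int)]).length - 2) = [w, (p.length : Int)] := by
              rw [List.length_append]
              simp only [List.length_cons, List.length_nil]
              rw [show (pvIdxs x p).length + 1 - 2 = (pvIdxs x p).length - 1 by omega]
              rw [List.drop_append_of_le_length (by omega)]
              have : (pvIdxs x p).drop ((pvIdxs x p).length - 1) = [w] := by
                rw [show (pvIdxs x p).length - 1 = ((pvIdxs x p).length - 2) + 1 by omega]
                rw [← List.drop_drop, ← hstored, huw]
                rfl
              rw [this]
              rfl
            rw [hdrop]
          · rw [if_neg hv, ih2 v, pvLast, pvLast, pvIdxs_append_ne v x p hv]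
      · have h1 : (pvIdxs x p).length = 1 := by
          have := List.length_pos_iff.mpr hne
          omega
        obtain ⟨i, hi⟩ := List.length_eq_one_iff.mp h1
        have hstored' : stored = [i] := by rw [hstored, hi]; rfl
        rw [show (stored.length == 2) = false by simp [hstored']]
        simp only [Bool.false_eq_true, if_false]
        have hg0 : PySem.List.pyGetD stored 0 0 = i := by rw [hstored', pyGetD_zero]
        refine ⟨?_, fun v => ?_⟩
        · rw [hXE, if_neg hlen, List.nil_append, ← hXY, ih1]
        · rw [PySem.Dict.get?_insert]
          by_cases hv : v = x
          · rw [if_pos hv, hv, hg0, pvLast, pvIdxs_append_self, hi]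
            simp
          · rw [if_neg hv, ih2 v, pvLast, pvLast, pvIdxs_append_ne v x p hv]

theorem B_eq_cands (nums : List Int) :
    minimumDistance2_alt nums =
      (if (pvCands nums).foldl min (10 ^ 10) ≠ 10 ^ 10 then (pvCands nums).foldl min (10 ^ 10) else -1) := by
  unfold minimumDistance2_alt
  simp only []
  rw [(B_loop nums).1]

-- ===== VERDICT (by name: the statement is the Claim_ definition above) =====
theorem minimumDistance2_spec : Claim_equal_minimumDistance2 := by
  intro nums _
  unfold Spec_minimumDistance2
  rw [A_eq_cands, B_eq_cands]
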